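-- pv_equiv track=rewrite | github.com/cheaterdxd/python-practice- | downloadScript.py | filterNumber
-- ===== SOURCE A (Python) =====
-- def filterNumber(Text):
-- 	i = 0
-- 	Text = Text.replace("\n", "")
-- 	Text = Text.replace(".",".\n")
-- 	while(i < len(Text)):
-- 		if(Text[i] == '\n' or Text[i] == " " or Text[i] == "."):
-- 			i+=1
-- 		elif (Text[i].isalpha() == False):
-- 			Text = Text.replace(Text[i],'')
-- 		else:
-- 			i+=1
-- 	return Text
-- ===== SOURCE B (Python) =====
-- def filterNumber(Text):
--     clean = ''.join(c for c in Text if c.isalpha() or c in ' .')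
--     return '.\n'.join(clean.split('.'))
-- ===== Notes on version B (the rewrite author's own statement) =====
-- stated objective: simpler
-- what changed: A repeatedly rescans and globally rewrites the string inside a while-loop (one full str.replace pass per offending character, restarting at the same index); B does a single filter pass keeping alphabetic characters, spaces and dots, then one split-on-'.'/rejoin-with-'.\n' pass.
import Mathlib
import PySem

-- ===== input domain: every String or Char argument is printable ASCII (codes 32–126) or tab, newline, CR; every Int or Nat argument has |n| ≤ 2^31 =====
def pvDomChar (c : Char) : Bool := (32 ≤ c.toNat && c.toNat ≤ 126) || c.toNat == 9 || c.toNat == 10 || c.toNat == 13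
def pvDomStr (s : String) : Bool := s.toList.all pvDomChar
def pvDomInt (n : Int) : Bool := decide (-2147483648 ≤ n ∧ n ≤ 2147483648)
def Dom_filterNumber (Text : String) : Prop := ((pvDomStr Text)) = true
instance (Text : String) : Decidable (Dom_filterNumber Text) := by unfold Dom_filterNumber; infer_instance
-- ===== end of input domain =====

-- B replaces A's repeated global-rescan while-loop (one str.replace over the whole string per
-- offending character) by a single filter pass plus one split-on-'.'/rejoin pass; objective: simpler.

-- ===== PORT A =====
-- These three lemmas are needed by the loop's termination proof (decreasing_by cites
-- length_replace_single_lt): str.replace with a single-character pattern acts elementwise,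
-- and removing a character that occurs strictly shrinks the string.
theorem replace_single_go (c : Char) (new : List Char) :
    ∀ (fuel : Nat) (l acc : List Char), l.length ≤ fuel →
      PySem.Chars.replace.go [c] new fuel l acc
        = acc.reverse ++ l.flatMap (fun x => if x = c then new else [x])
  | fuel, [], acc, h => by cases fuel <;> simp [PySem.Chars.replace.go]
  | 0, x::t, acc, h => by simp at h
  | fuel+1, x::t, acc, h => by
      simp only [PySem.Chars.replace.go]
      by_cases hx : c = x
      · subst hx
        rw [if_pos (by simp [List.isPrefixOf])]
        simp only [List.length_cons, List.length_nil, Nat.zero_add, List.drop_succ_cons, List.drop_zero]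
        rw [replace_single_go c new fuel t (new.reverse ++ acc) (by simp at h; omega)]
        simp
      · rw [if_neg (by simp [List.isPrefixOf, hx])]
        rw [replace_single_go c new fuel t (x :: acc) (by simp at h; omega)]
        simp [Ne.symm hx]

theorem replace_single (l : List Char) (c : Char) (new : List Char) :
    PySem.Chars.replace l [c] new = l.flatMap (fun x => if x = c then new else [x]) := by
  rw [PySem.Chars.replace]
  simp only [List.isEmpty_cons, Bool.false_eq_true, if_false]
  exact replace_single_go c new l.length l [] le_rfl

theorem flatMap_drop_eq_filter (l : List Char) (c : Char) :
    l.flatMap (fun x => if x = c then ([]:List Char) else [x]) = l.filter (fun x => !(x = c)) := by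
  induction l with
  | nil => simp
  | cons x t ih => by_cases hx : x = c <;> simp [hx, ih]

theorem length_replace_single_lt (l : List Char) (c : Char) (h : c ∈ l) :
    (PySem.Chars.replace l [c] []).length < l.length := by
  rw [replace_single, flatMap_drop_eq_filter]
  exact List.length_filter_lt_length_iff_exists.mpr ⟨c, h, by simp⟩

-- the while-loop of A: Text[i] kept (newline/space/dot/alpha) → i += 1;
-- otherwise Text = Text.replace(Text[i], '') with i unchanged
def filterNumberLoop (t : List Char) (i : Nat) : List Char :=
  if h : i < t.length then
    if t[i] = '\n' ∨ t[i] = ' ' ∨ t[i] = '.' then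
      filterNumberLoop t (i+1)
    else if PySem.Chars.isalpha t[i] = false then
      filterNumberLoop (PySem.Chars.replace t [t[i]] []) i
    else
      filterNumberLoop t (i+1)
  else t
termination_by t.length - i
decreasing_by
  · omega
  · have := length_replace_single_lt t t[i] (List.getElem_mem h)
    omega
  · omega

def filterNumber (Text : String) : String :=
  let t1 := PySem.Chars.replace Text.toList ['\n'] []       -- Text.replace("\n", "")
  let t2 := PySem.Chars.replace t1 ['.'] ['.', '\n']        -- Text.replace(".", ".\n")
  String.ofList (filterNumberLoop t2 0)

-- ===== PORT B =====
def filterNumber_alt (Text : String) : String :=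
  -- clean = ''.join(c for c in Text if c.isalpha() or c in ' .')
  let clean := Text.toList.filter (fun c => PySem.Chars.isalpha c || c = ' ' || c = '.')
  -- '.\n'.join(clean.split('.'))
  String.ofList (PySem.Chars.join ['.', '\n'] (PySem.Chars.splitOn clean ['.']))

-- ===== PRECONDITION & SPEC =====
def Spec_filterNumber (Text : String) (out : String) : Prop := out = filterNumber_alt Text
instance (Text : String) (out : String) : Decidable (Spec_filterNumber Text out) := by unfold Spec_filterNumber; infer_instance

-- ===== CLAIM (what is proved, stated in full; the proofs are below) =====
def Claim_equal_filterNumber : Prop := ∀ (Text : String), Dom_filterNumber Text → Spec_filterNumber Text (filterNumber Text)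

-- ===== LEMMAS AND PROOFS =====
-- the character class A's loop keeps
def keepA (c : Char) : Bool := c = '\n' || c = ' ' || c = '.' || PySem.Chars.isalpha c
-- the character class B's filter keeps
def keepB (c : Char) : Bool := PySem.Chars.isalpha c || c = ' ' || c = '.'

-- A's while-loop is the keepA-filter (prefix below i already kept, suffix filtered)
theorem filterNumberLoop_eq_filter (n : Nat) : ∀ (t : List Char) (i : Nat),
    t.length - i ≤ n → (∀ c ∈ t.take i, keepA c = true) →
    filterNumberLoop t i = t.take i ++ (t.drop i).filter keepA := by
  induction n with
  | zero =>
    intro t i hn hpre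
    have hge : t.length ≤ i := by omega
    rw [filterNumberLoop, dif_neg (by omega)]
    simp [List.take_of_length_le hge, List.drop_of_length_le hge]
  | succ n ih =>
    intro t i hn hpre
    by_cases h : i < t.length
    · have hdrop : t.drop i = t[i] :: t.drop (i+1) := List.drop_eq_getElem_cons h
      by_cases hk1 : t[i] = '\n' ∨ t[i] = ' ' ∨ t[i] = '.'
      · rw [filterNumberLoop, dif_pos h, if_pos hk1]
        have hkeep : keepA t[i] = true := by
          unfold keepA; rcases hk1 with h1|h1|h1 <;> simp [h1]
        rw [ih t (i+1) (by omega)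
          (by intro a hc
              rw [List.take_add_one, List.getElem?_eq_getElem h] at hc
              simp only [Option.toList_some, List.mem_append, List.mem_singleton] at hc
              rcases hc with hc|hc
              · exact hpre a hc
              · rw [hc]; exact hkeep)]
        conv_rhs => rw [hdrop]
        rw [List.filter_cons, if_pos (by simp [hkeep]), List.append_cons]
        congr 1
        rw [List.take_add_one, List.getElem?_eq_getElem h]
        simp only [Option.toList_some]
      · by_cases ha : PySem.Chars.isalpha t[i] = false
        · -- remove-all branch
          rw [filterNumberLoop, dif_pos h, if_neg hk1, if_pos ha]
          have hkeep : keepA t[i] = false := by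
            unfold keepA
            simp only [not_or] at hk1
            simp [hk1.1, hk1.2.1, hk1.2.2, ha]
          set c := t[i] with hc
          have hrep : PySem.Chars.replace t [c] [] = t.filter (fun x => !(x = c)) := by
            rw [replace_single, flatMap_drop_eq_filter]
          have hsplit : t = t.take i ++ t.drop i := (List.take_append_drop i t).symm
          have hpreserve : (t.take i).filter (fun x => !(x = c)) = t.take i := by
            apply List.filter_eq_self.mpr
            intro a ha'
            have hka := hpre a ha'
            have hne : a ≠ c := fun hh => by rw [hh, hkeep] at hka; cases hka
            simp [hne]
          have hform : PySem.Chars.replace t [c] [] = t.take i ++ (t.drop i).filter (fun x => !(x = c)) := by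
            rw [hrep]
            conv_lhs => rw [hsplit]
            rw [List.filter_append, hpreserve]
          have hlentake : (t.take i).length = i := by
            rw [List.length_take]; omega
          have htake' : (PySem.Chars.replace t [c] []).take i = t.take i := by
            rw [hform, List.take_append_of_le_length (by omega)]
            simp [List.take_take]
          have hdrop' : (PySem.Chars.replace t [c] []).drop i = (t.drop i).filter (fun x => !(x = c)) := by
            rw [hform]
            have hdl : List.drop (t.take i).length (t.take i ++ (t.drop i).filter (fun x => !(x = c))) = (t.drop i).filter (fun x => !(x = c)) := List.drop_left
            rwa [hlentake] at hdl
          have hlen : (PySem.Chars.replace t [c] []).length < t.length :=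
            length_replace_single_lt t c (by rw [hc]; exact List.getElem_mem h)
          rw [ih (PySem.Chars.replace t [c] []) i (by omega)
            (by rw [htake']; exact hpre)]
          rw [htake', hdrop']
          congr 1
          rw [List.filter_filter]
          apply List.filter_congr
          intro a _
          by_cases hac : a = c
          · rw [hac]; simp [hkeep]
          · simp [hac]
        · -- alpha keep branch
          rw [filterNumberLoop, dif_pos h, if_neg hk1, if_neg ha]
          have hkeep : keepA t[i] = true := by
            unfold keepA; simp at ha; simp [ha]
          rw [ih t (i+1) (by omega)
            (by intro a hc
                rw [List.take_add_one, List.getElem?_eq_getElem h] at hc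
                simp only [Option.toList_some, List.mem_append, List.mem_singleton] at hc
                rcases hc with hc|hc
                · exact hpre a hc
                · rw [hc]; exact hkeep)]
          conv_rhs => rw [hdrop]
          rw [List.filter_cons, if_pos (by simp [hkeep]), List.append_cons]
          congr 1
          rw [List.take_add_one, List.getElem?_eq_getElem h]
          simp only [Option.toList_some]
    · rw [filterNumberLoop, dif_neg h]
      have hge : t.length ≤ i := by omega
      simp [List.take_of_length_le hge, List.drop_of_length_le hge]

def split1 (c : Char) (pre : List Char) : List Char → List (List Char)
  | [] => [pre]
  | x :: t => if x = c then pre :: split1 c [] t else split1 c (pre ++ [x]) t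

theorem splitOn_single_go (c : Char) :
    ∀ (fuel : Nat) (l cur : List Char) (acc : List (List Char)), l.length < fuel →
      PySem.Chars.splitOn.go [c] fuel l cur acc
        = acc.reverse ++ split1 c cur.reverse l
  | 0, l, cur, acc, h => by simp at h
  | fuel+1, [], cur, acc, h => by
      simp [PySem.Chars.splitOn.go, split1]
  | fuel+1, x::t, cur, acc, h => by
      simp only [PySem.Chars.splitOn.go]
      by_cases hx : c = x
      · subst hx
        rw [if_pos (by simp [List.isPrefixOf])]
        simp only [List.length_cons, List.length_nil, Nat.zero_add, List.drop_succ_cons, List.drop_zero]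
        rw [splitOn_single_go c fuel t [] (cur.reverse :: acc) (by simp at h; omega)]
        simp [split1]
      · rw [if_neg (by simp [List.isPrefixOf, hx])]
        rw [splitOn_single_go c fuel t (x :: cur) acc (by simp at h; omega)]
        simp [split1, Ne.symm hx]

theorem splitOn_single (l : List Char) (c : Char) :
    PySem.Chars.splitOn l [c] = split1 c [] l := by
  rw [PySem.Chars.splitOn]
  simpa using splitOn_single_go c (l.length + 1) l [] [] (by omega)

theorem split1_ne_nil (c : Char) (pre l : List Char) : split1 c pre l ≠ [] := by
  induction l generalizing pre with
  | nil => simp [split1]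
  | cons x t ih => by_cases hx : x = c <;> simp [split1, hx, ih]

theorem join_split1 (c : Char) (sep : List Char) (l : List Char) : ∀ pre,
    PySem.Chars.join sep (split1 c pre l) =
      pre ++ l.flatMap (fun x => if x = c then sep else [x]) := by
  induction l with
  | nil => intro pre; simp [split1, PySem.Chars.join, List.intercalate]
  | cons x t ih =>
    intro pre
    by_cases hx : x = c
    · simp only [split1, if_pos hx]
      obtain ⟨a, rest, hr⟩ : ∃ a rest, split1 c [] t = a :: rest := by
        cases hs : split1 c [] t with
        | nil => exact absurd hs (split1_ne_nil c [] t)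
        | cons a rest => exact ⟨a, rest, rfl⟩
      have hj : PySem.Chars.join sep (pre :: a :: rest) = pre ++ sep ++ PySem.Chars.join sep (a :: rest) := by
        simp [PySem.Chars.join, List.intercalate, List.intersperse]
      rw [hr, hj, ← hr, ih []]
      simp [hx]
    · simp only [split1, if_neg hx]
      rw [ih (pre ++ [x])]
      simp [hx]

-- the '.' → ".\n" expansion both programs perform, as a flatMap
def repDot (x : Char) : List Char := if x = '.' then ['.', '\n'] else [x]

theorem filter_keepA_flatMap (l : List Char) (h : ∀ c ∈ l, c ≠ '\n') :
    (l.flatMap repDot).filter keepA = (l.filter keepB).flatMap repDot := by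
  induction l with
  | nil => simp
  | cons x t ih =>
    have hx : x ≠ '\n' := h x (by simp)
    have iht := ih (fun c hc => h c (by simp [hc]))
    by_cases hd : x = '.'
    · subst hd
      simp [repDot, keepA, keepB, iht]
    · have hrep : repDot x = [x] := by simp [repDot, hd]
      have hab : keepA x = keepB x := by
        unfold keepA keepB
        simp [hx, hd]
        by_cases hs : x = ' ' <;> simp [hs]
      simp only [List.flatMap_cons, hrep, List.filter_cons, List.filter_append, hab, iht]
      by_cases hk : keepB x = true
      · simp [hk, hrep]
      · simp at hk
        simp [hk]

theorem filter_keepB_no_newline (s : List Char) :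
    (s.filter (fun x => !(x = '\n'))).filter keepB = s.filter keepB := by
  rw [List.filter_filter]
  apply List.filter_congr
  intro a _
  by_cases ha : a = '\n'
  · subst ha; simp [keepB]; decide
  · simp [ha]

-- ===== VERDICT (by name: the statement is the Claim_ definition above) =====
theorem filterNumber_spec : Claim_equal_filterNumber := by
  intro Text _
  unfold Spec_filterNumber filterNumber filterNumber_alt
  show String.ofList (filterNumberLoop (PySem.Chars.replace (PySem.Chars.replace Text.toList ['\n'] []) ['.'] ['.', '\n']) 0)
      = String.ofList (PySem.Chars.join ['.', '\n'] (PySem.Chars.splitOn (Text.toList.filter (fun c => PySem.Chars.isalpha c || c = ' ' || c = '.')) ['.']))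
  congr 1
  set s := Text.toList with hs
  -- A side
  have h1 : PySem.Chars.replace s ['\n'] [] = s.filter (fun x => !(x = '\n')) := by
    rw [replace_single, flatMap_drop_eq_filter]
  have h2 : PySem.Chars.replace (s.filter (fun x => !(x = '\n'))) ['.'] ['.', '\n']
      = (s.filter (fun x => !(x = '\n'))).flatMap repDot := by
    rw [replace_single]; rfl
  have hloop := filterNumberLoop_eq_filter
      (((s.filter (fun x => !(x = '\n'))).flatMap repDot).length)
      ((s.filter (fun x => !(x = '\n'))).flatMap repDot) 0 (by omega) (by simp)
  simp only [List.take_zero, List.drop_zero, List.nil_append] at hloop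
  rw [h1, h2, hloop]
  have hnn : ∀ c ∈ s.filter (fun x => !(x = '\n')), c ≠ '\n' := by
    intro c hc
    have := List.of_mem_filter hc
    simpa using this
  rw [filter_keepA_flatMap _ hnn, filter_keepB_no_newline]
  -- B side
  rw [splitOn_single, join_split1]
  simp only [List.nil_append]
  rfl
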